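-- pv_equiv track=rewrite | github.com/vaccarieli/IN1M8L3 | main.py | add_names_to_duplicate_lastnames
-- ===== SOURCE A (Python) =====
-- def find_duplicate(lst):
--     seen = set()
--     for element in lst:
--         if element in seen:
--             return element.strip()
--         seen.add(element)
--     return None  # If no duplicates are found
--
-- def get_first_names(names):
--     first_names = []
--     for name in names.split(","):
--         first_names.append(name.strip().replace("and ", "").split(" ")[0].strip())
--     return first_names
--
-- def find_element_index(last_names, duplicate_lastname):
--     indexes_found = []
--     for i, last_name in enumerate(last_names):
--         if last_name == duplicate_lastname:
--             indexes_found.append(i)  # Save the index of matching last name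
--     return indexes_found
--
-- def add_names_to_duplicate_lastnames(client_names, mr_mrs_client_last_name):
--     last_names = [i.strip() for i in mr_mrs_client_last_name.replace(", and ", ",").split(",")]
--     duplicate_lastname = find_duplicate(last_names)
--
--     first_names = get_first_names(client_names)
--
--     for index in find_element_index(last_names, duplicate_lastname):
--         last_names[index] = f"{last_names[index]} ({first_names[index]})"
--
--     last_names[-1] = "and " + last_names[-1]
--     return ", ".join(last_names)
-- ===== SOURCE B (Python) =====
-- def add_names_to_duplicate_lastnames(client_names, mr_mrs_client_last_name):
--     last_names = [s.strip() for s in mr_mrs_client_last_name.replace(", and ", ",").split(",")]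
--     first_names = [p.strip().replace("and ", "").split(" ")[0].strip() for p in client_names.split(",")]
--
--     positions = {}
--     for i, name in enumerate(last_names):
--         positions.setdefault(name, []).append(i)
--
--     dup_positions = min((ps for ps in positions.values() if len(ps) >= 2),
--                         key=lambda ps: ps[1], default=None)
--
--     parts = [f"{name} ({first_names[i]})" if dup_positions is not None and i in dup_positions else name
--              for i, name in enumerate(last_names)]
--     parts[-1] = "and " + parts[-1]
--     return ", ".join(parts)
-- ===== Notes on version B (the rewrite author's own statement) =====
-- stated objective: simpler
-- what changed: Replaces the three-pass seen-set scan (find_duplicate) + index rescan (find_element_index) + in-place mutation loop by one grouping pass building a dict last-name -> index list, picking the duplicate as the group with minimal second-occurrence index, and emitting the annotated list as a single comprehension.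
import Mathlib
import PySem

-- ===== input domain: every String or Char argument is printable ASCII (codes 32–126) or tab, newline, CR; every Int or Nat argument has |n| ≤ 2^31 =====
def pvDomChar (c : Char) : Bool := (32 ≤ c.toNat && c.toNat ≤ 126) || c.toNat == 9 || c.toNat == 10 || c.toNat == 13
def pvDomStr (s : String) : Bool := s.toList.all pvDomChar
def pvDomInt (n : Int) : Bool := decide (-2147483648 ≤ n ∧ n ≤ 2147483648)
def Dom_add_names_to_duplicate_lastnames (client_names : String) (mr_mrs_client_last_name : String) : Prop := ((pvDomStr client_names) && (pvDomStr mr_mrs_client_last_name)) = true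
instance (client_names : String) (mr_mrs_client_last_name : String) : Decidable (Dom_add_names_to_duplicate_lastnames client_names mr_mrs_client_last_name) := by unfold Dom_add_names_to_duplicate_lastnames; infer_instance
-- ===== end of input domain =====

-- B replaces A's seen-set scan + full index rescan + in-place mutation loop by one dict
-- grouping pass (last name -> index list), choosing the duplicate as the group with the
-- minimal second-occurrence index, and building the output in a single comprehension;
-- objective: simpler. Equivalence is about the return value (neither mutates its arguments).

-- ===== PORT A =====
def pvFindDuplicate : List String → PySem.Set String → Option String
  | [], _ => none
  | x :: rest, seen =>
    if PySem.Set.contains seen x then some (PySem.Str.strip x)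
    else pvFindDuplicate rest (PySem.Set.add seen x)

def pvGetFirstNames (names : String) : List String :=
  ((PySem.Str.split? names ",").getD []).foldl
    (fun acc name =>
      acc ++ [PySem.Str.strip (PySem.List.pyGetD
        ((PySem.Str.split? (PySem.Str.replace (PySem.Str.strip name) "and " "") " ").getD []) 0 "")]) []

def pvFindElementIndex (lastNames : List String) (dup : Option String) : List Int :=
  (PySem.List.enumerate lastNames 0).foldl
    (fun acc p => if some p.2 = dup then acc ++ [p.1] else acc) []

def add_names_to_duplicate_lastnames (client_names : String) (mr_mrs_client_last_name : String) : String :=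
  let lastNames := ((PySem.Str.split? (PySem.Str.replace mr_mrs_client_last_name ", and " ",") ",").getD []).map PySem.Str.strip
  let dup := pvFindDuplicate lastNames PySem.Set.empty
  let firstNames := pvGetFirstNames client_names
  let lastNames2 := (pvFindElementIndex lastNames dup).foldl
      (fun ln idx => PySem.List.pySetD ln idx
        (PySem.List.pyGetD ln idx "" ++ " (" ++ PySem.List.pyGetD firstNames idx "" ++ ")")) lastNames
  let lastNames3 := PySem.List.pySetD lastNames2 (-1) ("and " ++ PySem.List.pyGetD lastNames2 (-1) "")
  PySem.Str.join ", " lastNames3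

-- ===== PORT B =====
def add_names_to_duplicate_lastnames_alt (client_names : String) (mr_mrs_client_last_name : String) : String :=
  let lastNames := ((PySem.Str.split? (PySem.Str.replace mr_mrs_client_last_name ", and " ",") ",").getD []).map PySem.Str.strip
  let firstNames := ((PySem.Str.split? client_names ",").getD []).map
      (fun p => PySem.Str.strip (PySem.List.pyGetD
        ((PySem.Str.split? (PySem.Str.replace (PySem.Str.strip p) "and " "") " ").getD []) 0 ""))
  let positions := (PySem.List.enumerate lastNames 0).foldl
      (fun d p => PySem.Dict.modify d p.2 [] (fun l => l ++ [p.1])) PySem.Dict.empty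
  let dupPositions := PySem.List.min?
      ((PySem.Dict.values positions).filter (fun ps => decide (2 ≤ ps.length)))
      (fun ps => PySem.List.pyGetD ps 1 0)
  let parts := (PySem.List.enumerate lastNames 0).map
      (fun p => match dupPositions with
        | some ps => if p.1 ∈ ps then p.2 ++ " (" ++ PySem.List.pyGetD firstNames p.1 "" ++ ")" else p.2
        | none => p.2)
  let parts2 := PySem.List.pySetD parts (-1) ("and " ++ PySem.List.pyGetD parts (-1) "")
  PySem.Str.join ", " parts2

-- ===== PRECONDITION & SPEC =====
-- Pre_ excludes exactly the inputs on which the Python A raises IndexError: a duplicate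
-- last name exists and one of its occurrence positions is ≥ the number of first names.
def Pre_add_names_to_duplicate_lastnames (client_names : String) (mr_mrs_client_last_name : String) : Prop :=
  (let L := ((PySem.Str.split? (PySem.Str.replace mr_mrs_client_last_name ", and " ",") ",").getD []).map PySem.Str.strip
   let flen := ((PySem.Str.split? client_names ",").getD []).length
   match (List.range L.length).find? (fun i => (L.take i).contains (L.getD i "")) with
   | none => true
   | some i => (List.range L.length).all
       (fun j => !(L.getD j "" == L.getD i "") || decide (j < flen))) = true
instance (client_names : String) (mr_mrs_client_last_name : String) : Decidable (Pre_add_names_to_duplicate_lastnames client_names mr_mrs_client_last_name) := by unfold Pre_add_names_to_duplicate_lastnames; infer_instance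

def pvWitness_add_names_to_duplicate_lastnames : String × String := ("Ann Smith, Bob Smith", "Smith, and Smith")

def Spec_add_names_to_duplicate_lastnames (client_names : String) (mr_mrs_client_last_name : String) (out : String) : Prop := out = add_names_to_duplicate_lastnames_alt client_names mr_mrs_client_last_name
instance (client_names : String) (mr_mrs_client_last_name : String) (out : String) : Decidable (Spec_add_names_to_duplicate_lastnames client_names mr_mrs_client_last_name out) := by unfold Spec_add_names_to_duplicate_lastnames; infer_instance

-- ===== CLAIM (what is proved, stated in full; the proofs are below) =====
def Claim_equal_add_names_to_duplicate_lastnames : Prop := ∀ (client_names : String) (mr_mrs_client_last_name : String), Dom_add_names_to_duplicate_lastnames client_names mr_mrs_client_last_name → Pre_add_names_to_duplicate_lastnames client_names mr_mrs_client_last_name → Spec_add_names_to_duplicate_lastnames client_names mr_mrs_client_last_name (add_names_to_duplicate_lastnames client_names mr_mrs_client_last_name)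

-- ===== LEMMAS AND PROOFS =====

-- proof-side helpers: occurrence-index lists of a name
def pvOccN (L : List String) (d : String) : List Nat :=
  (List.range L.length).filter (fun k => L.getD k "" == d)

def pvOccI (L : List String) (d : String) : List Int :=
  ((PySem.List.enumerate L 0).filter (fun p => p.2 == d)).map (fun p => p.1)

-- strip is idempotent
theorem pv_dropWhile_idem (p : Char → Bool) (l : List Char) :
    (l.dropWhile p).dropWhile p = l.dropWhile p := by
  induction l with
  | nil => simp
  | cons x t ih =>
    by_cases hx : p x = true
    · simp [hx, ih]
    · simp [hx]

theorem pv_head?_append {α : Type} {l₁ l₂ : List α} (h : l₁ ≠ []) :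
    (l₁ ++ l₂).head? = l₁.head? := by
  cases l₁ <;> simp_all

theorem pv_dropWhile_head? {p : Char → Bool} :
    ∀ {l : List Char} {x : Char}, (l.dropWhile p).head? = some x → p x = false := by
  intro l
  induction l with
  | nil => intro x h; simp at h
  | cons a t ih =>
    intro x h
    by_cases ha : p a = true
    · rw [List.dropWhile_cons_of_pos ha] at h; exact ih h
    · rw [List.dropWhile_cons_of_neg ha] at h
      simp only [List.head?_cons, Option.some.injEq] at h
      subst h; simpa using ha

theorem pv_dropWhile_eq_self {p : Char → Bool} {l : List Char}
    (h : ∀ x, l.head? = some x → p x = false) : l.dropWhile p = l := by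
  cases l with
  | nil => simp
  | cons a t => simp [h a rfl]

theorem pv_chars_strip_idem (l : List Char) :
    PySem.Chars.strip (PySem.Chars.strip l) = PySem.Chars.strip l := by
  unfold PySem.Chars.strip PySem.Chars.rstrip PySem.Chars.lstrip
  have hidem := pv_dropWhile_idem PySem.Chars.isspace
  set p := PySem.Chars.isspace with hp
  set t := l.dropWhile p with ht
  set X := (t.reverse.dropWhile p).reverse with hX
  have hXdrop : X.dropWhile p = X := by
    apply pv_dropWhile_eq_self
    intro x hx
    have hXne : X ≠ [] := by intro h; rw [h] at hx; simp at hx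
    obtain ⟨pre, hpre⟩ := List.dropWhile_suffix (l := t.reverse) (p := p)
    have htX : t = X ++ pre.reverse := by
      have := congrArg List.reverse hpre
      simpa [hX] using this.symm
    have hhead : t.head? = some x := by
      rw [htX, pv_head?_append hXne]; exact hx
    exact pv_dropWhile_head? (ht ▸ hhead)
  rw [hXdrop]
  have : X.reverse = t.reverse.dropWhile p := by simp [hX]
  rw [this, hidem]

theorem pv_strip_idem (s : String) :
    PySem.Str.strip (PySem.Str.strip s) = PySem.Str.strip s := by
  rw [← String.toList_inj]
  rw [PySem.Str.toList_strip, PySem.Str.toList_strip, pv_chars_strip_idem]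

-- find? over a range: value, membership, minimality
theorem pv_find?_range_some {p : Nat → Bool} {n i : Nat}
    (h : (List.range n).find? p = some i) :
    i < n ∧ p i = true ∧ ∀ j < i, p j = false := by
  have hin : i < n := List.mem_range.mp (List.mem_of_find?_eq_some h)
  rw [List.find?_eq_some_iff_append] at h
  obtain ⟨hpi, as, bs, heq, hall⟩ := h
  refine ⟨hin, hpi, ?_⟩
  have hlen : as.length < n := by
    have := congrArg List.length heq
    simp at this; omega
  have hi : i = as.length := by
    have h2 := congrArg (fun l => l[as.length]?) heq
    simp only at h2
    rw [List.getElem?_range hlen, List.getElem?_append_right (le_refl _)] at h2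
    simp at h2; omega
  have has : as = List.range i := by
    have h3 := congrArg (List.take as.length) heq
    rw [List.take_left, List.take_range] at h3
    rw [← h3]
    congr 1
    omega
  intro j hj
  have hjas : j ∈ as := by rw [has]; exact List.mem_range.mpr hj
  simpa using hall j hjas

theorem pv_countP_range_one {q : Nat → Bool} {a : Nat} :
    ∀ {n : Nat}, a < n → q a = true → (∀ b, b < n → q b = true → b = a) →
      (List.range n).countP q = 1 := by
  intro n
  induction n with
  | zero => omega
  | succ n ih =>
    intro han hqa huni
    rw [List.range_succ, List.countP_append]
    by_cases hna : a = n
    · have h0 : (List.range n).countP q = 0 := by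
        rw [List.countP_eq_zero]
        intro b hb hqb
        have := huni b (by have := List.mem_range.mp hb; omega) hqb
        have := List.mem_range.mp hb
        omega
      subst hna
      simp [h0, hqa]
    · have han' : a < n := by omega
      have hqn : q n = false := by
        by_cases h : q n = true
        · exact absurd (huni n (by omega) h) (fun he => hna he.symm)
        · simpa using h
      have h1 := ih han' hqa (fun b hb hqb => huni b (by omega) hqb)
      simp [h1, hqn]

theorem pv_pairwise_getElem? :
    ∀ {xs : List Nat}, xs.Pairwise (· < ·) →
      ∀ {v k : Nat}, v ∈ xs → xs.countP (fun b => decide (b < v)) = k → xs[k]? = some v := by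
  intro xs
  induction xs with
  | nil => intro _ v k hv; simp at hv
  | cons a t ih =>
    intro hp v k hv hc
    have hat : ∀ b ∈ t, a < b := (List.pairwise_cons.mp hp).1
    have hpt : t.Pairwise (· < ·) := (List.pairwise_cons.mp hp).2
    rcases List.mem_cons.mp hv with rfl | hvt
    · have h0 : (v :: t).countP (fun b => decide (b < v)) = 0 := by
        rw [List.countP_eq_zero]
        intro b hb
        rcases List.mem_cons.mp hb with rfl | hbt
        · simp
        · have := hat b hbt; simp; omega
      rw [h0] at hc
      subst hc
      simp
    · have hav : a < v := hat v hvt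
      rw [List.countP_cons] at hc
      have hdec : (decide (a < v)) = true := by simpa using hav
      rw [hdec] at hc
      simp only [if_true] at hc
      cases k with
      | zero => omega
      | succ k' =>
        simp only [List.getElem?_cons_succ]
        exact ih hpt hvt (by omega)

-- enumerate-filter vs range-filter
theorem pv_enum_filter (c : String) :
    ∀ (L : List String) (s : Int),
      (((PySem.List.enumerate L s).filter (fun p => p.2 == c)).map (fun p => p.1))
        = ((List.range L.length).filter (fun k => L.getD k "" == c)).map (fun (k : Nat) => s + (k : Int)) := by
  intro L
  induction L with
  | nil => intro s; simp [PySem.List.enumerate_nil]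
  | cons x t ih =>
    intro s
    rw [PySem.List.enumerate_cons, List.length_cons, List.range_succ_eq_map]
    rw [List.filter_cons, List.filter_cons]
    have hsucc : ((List.range t.length).map Nat.succ).filter (fun k => (x :: t).getD k "" == c)
        = ((List.range t.length).filter (fun k => t.getD k "" == c)).map Nat.succ := by
      rw [List.filter_map]
      congr 1
    have hmap : (((List.range t.length).filter (fun k => t.getD k "" == c)).map Nat.succ).map (fun (k : Nat) => s + (k : Int))
        = ((List.range t.length).filter (fun k => t.getD k "" == c)).map (fun (k : Nat) => (s + 1) + (k : Int)) := by
      rw [List.map_map]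
      apply List.map_congr_left
      intro b _
      simp [Function.comp]
      ring
    by_cases hx : (x == c) = true
    · simp only [show ((x :: t).getD 0 "" == c) = (x == c) from rfl, hx, if_true]
      rw [List.map_cons, List.map_cons, ih (s + 1), hsucc, hmap]
      simp
    · simp only [show ((x :: t).getD 0 "" == c) = (x == c) from rfl, hx,
        Bool.false_eq_true, if_false]
      rw [ih (s + 1), hsucc, hmap]

theorem pv_getD_eq_getElem (L : List String) {a : Nat} (h : a < L.length) :
    L.getD a "" = L[a] := by
  rw [List.getD_eq_getElem?_getD, List.getElem?_eq_getElem h]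
  rfl

theorem pv_getD_mem_take {L : List String} {a b : Nat} (hab : a < b) (haL : a < L.length) :
    L.getD a "" ∈ L.take b := by
  have h : (L.take b)[a]'(by simp; omega) = L[a] := List.getElem_take
  rw [pv_getD_eq_getElem L haL, ← h]
  exact List.getElem_mem _

theorem pv_mem_take_ex {L : List String} {i : Nat} {v : String} (h : v ∈ L.take i) :
    ∃ a, a < i ∧ a < L.length ∧ L.getD a "" = v := by
  obtain ⟨a, halt, hav⟩ := List.mem_iff_getElem.mp h
  have h1 : a < i ∧ a < L.length := by simp at halt; omega
  refine ⟨a, h1.1, h1.2, ?_⟩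
  rw [pv_getD_eq_getElem L h1.2, ← hav]
  exact List.getElem_take.symm

theorem pv_occI_eq (L : List String) (d : String) :
    pvOccI L d = (pvOccN L d).map (fun (k : Nat) => (k : Int)) := by
  unfold pvOccI pvOccN
  rw [pv_enum_filter]
  simp

theorem pv_occN_pairwise (L : List String) (d : String) :
    (pvOccN L d).Pairwise (· < ·) :=
  List.Pairwise.filter _ List.pairwise_lt_range

theorem pv_mem_occN {L : List String} {d : String} {k : Nat} :
    k ∈ pvOccN L d ↔ k < L.length ∧ L.getD k "" = d := by
  simp [pvOccN, List.mem_filter, List.mem_range]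

-- find_duplicate characterised
theorem pv_fd_aux :
    ∀ (l pre : List String),
      pvFindDuplicate l (PySem.Set.ofList pre)
        = ((List.range l.length).find? (fun i => (pre ++ l.take i).contains (l.getD i ""))).map
            (fun i => PySem.Str.strip (l.getD i "")) := by
  intro l
  induction l with
  | nil => intro pre; simp [pvFindDuplicate]
  | cons x t ih =>
    intro pre
    rw [List.length_cons, List.range_succ_eq_map, List.find?_cons]
    have hcont : (PySem.Set.contains (PySem.Set.ofList pre) x) = ((pre ++ (x :: t).take 0).contains ((x :: t).getD 0 "")) := by
      simp [PySem.Set.contains, PySem.Set.mem_ofList]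
    by_cases hx : ((pre ++ (x :: t).take 0).contains ((x :: t).getD 0 "")) = true
    · rw [pvFindDuplicate, if_pos (hcont.trans hx)]
      simp only [hx]
      simp
    · rw [pvFindDuplicate, if_neg (by rw [hcont]; simpa using hx)]
      simp only [hx]
      have hadd : PySem.Set.add (PySem.Set.ofList pre) x = PySem.Set.ofList (pre ++ [x]) := by
        rw [PySem.Set.ofList_eq_foldl, PySem.Set.ofList_eq_foldl, List.foldl_append]
        simp [PySem.Set.add]
      rw [hadd, ih (pre ++ [x])]
      rw [List.find?_map]
      have hpred : ((fun i => (pre ++ (x :: t).take i).contains ((x :: t).getD i "")) ∘ Nat.succ)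
          = (fun i => ((pre ++ [x]) ++ t.take i).contains (t.getD i "")) := by
        funext i
        simp [Function.comp, List.take_succ_cons, List.append_assoc]
      rw [hpred]
      rw [Option.map_map]
      rfl

-- find_element_index
theorem pv_find_element_none (L : List String) :
    pvFindElementIndex L none = [] := by
  unfold pvFindElementIndex
  have : ∀ (l : List (Int × String)) (acc : List Int),
      l.foldl (fun acc p => if some p.2 = none then acc ++ [p.1] else acc) acc = acc := by
    intro l
    induction l with
    | nil => intro acc; simp
    | cons a t ih => intro acc; simp
  exact this _ []

theorem pv_find_element_some (L : List String) (d : String) :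
    pvFindElementIndex L (some d) = pvOccI L d := by
  unfold pvFindElementIndex pvOccI
  have hfn : (fun (acc : List Int) (p : Int × String) => if some p.2 = some d then acc ++ [p.1] else acc)
      = (fun acc p => if (p.2 == d) = true then acc ++ [p.1] else acc) := by
    funext acc p
    by_cases h : p.2 = d <;> simp [h]
  rw [hfn, PySem.List.foldl_append_if]
  simp

-- the grouping dict
theorem pv_positions_getD (L : List String) (c : String) :
    (((PySem.List.enumerate L 0).foldl
        (fun d p => PySem.Dict.modify d p.2 [] (fun l => l ++ [p.1])) PySem.Dict.empty).getD c [])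
      = pvOccI L c := by
  have hswap : (PySem.List.enumerate L 0).foldl
        (fun d p => PySem.Dict.modify d p.2 [] (fun l => l ++ [p.1])) PySem.Dict.empty
      = ((PySem.List.enumerate L 0).map (fun p => (p.2, p.1))).foldl
        (fun d q => PySem.Dict.modify d q.1 [] (fun l => l ++ [q.2])) PySem.Dict.empty := by
    rw [List.foldl_map]
  rw [hswap, PySem.Dict.getD_foldl_modify_append]
  simp [pvOccI, List.filter_map, List.map_map, Function.comp_def]

theorem pv_positions_keys (L : List String) :
    (((PySem.List.enumerate L 0).foldl
        (fun d p => PySem.Dict.modify d p.2 [] (fun l => l ++ [p.1])) PySem.Dict.empty).keys)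
      = PySem.Set.ofList L := by
  have h := PySem.Dict.keys_foldl_modify_key (PySem.List.enumerate L 0)
      (fun p => p.2) ([] : List Int) (fun _ p l => l ++ [p.1]) PySem.Dict.empty
  rw [h]
  simp [PySem.Dict.keys_empty, PySem.Set.update_nil_left, PySem.List.map_snd_enumerate]

theorem pv_positions_values (L : List String) :
    (((PySem.List.enumerate L 0).foldl
        (fun d p => PySem.Dict.modify d p.2 [] (fun l => l ++ [p.1])) PySem.Dict.empty).values)
      = (PySem.Set.ofList L).map (fun nm => pvOccI L nm) := by
  rw [PySem.Dict.values_eq_map_keys _ (by rw [pv_positions_keys]; exact PySem.Set.nodup_ofList L) ([] : List Int)]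
  rw [pv_positions_keys]
  exact List.map_congr_left (fun nm _ => pv_positions_getD L nm)

-- no duplicate: no name occurs twice
theorem pv_no_two (L : List String)
    (hfind : (List.range L.length).find? (fun i => (L.take i).contains (L.getD i "")) = none)
    (nm : String) (h2 : 2 ≤ (pvOccN L nm).length) : False := by
  have hpf := List.find?_eq_none.mp hfind
  cases hocc : pvOccN L nm with
  | nil => rw [hocc] at h2; simp at h2
  | cons a tl =>
    cases tl with
    | nil => rw [hocc] at h2; simp at h2
    | cons b rest =>
      have hpw := pv_occN_pairwise L nm
      rw [hocc] at hpw
      have hab : a < b := ((List.pairwise_cons.mp hpw).1) b (by simp)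
      have ha : a ∈ pvOccN L nm := by rw [hocc]; simp
      have hb : b ∈ pvOccN L nm := by rw [hocc]; simp
      obtain ⟨haL, haD⟩ := pv_mem_occN.mp ha
      obtain ⟨hbL, hbD⟩ := pv_mem_occN.mp hb
      apply hpf b (List.mem_range.mpr hbL)
      simp only [List.contains_iff_mem]
      rw [hbD]
      have h := pv_getD_mem_take hab haL
      rw [haD] at h
      exact h

-- the chosen duplicate is the group with minimal second-occurrence index
theorem pv_best (L : List String) {i₀ : Nat}
    (hfind : (List.range L.length).find? (fun i => (L.take i).contains (L.getD i "")) = some i₀) :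
    PySem.List.min?
        ((((PySem.List.enumerate L 0).foldl
            (fun d p => PySem.Dict.modify d p.2 [] (fun l => l ++ [p.1])) PySem.Dict.empty).values).filter
          (fun ps => decide (2 ≤ ps.length)))
        (fun ps => PySem.List.pyGetD ps 1 0)
      = some (pvOccI L (L.getD i₀ "")) := by
  obtain ⟨hin, hpi, hmin⟩ := pv_find?_range_some hfind
  set d := L.getD i₀ "" with hd
  -- a unique earlier occurrence of d
  have hcont : ∃ a, a < i₀ ∧ a < L.length ∧ L.getD a "" = d := by
    simp only [List.contains_iff_mem] at hpi
    exact pv_mem_take_ex hpi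
  obtain ⟨a, hai, haL, haD⟩ := hcont
  have huniq : ∀ b, b < i₀ → b < L.length → L.getD b "" = d → b = a := by
    intro b hb hbL hbD
    by_contra hne
    rcases Nat.lt_or_ge b a with hba | hba
    · have hp : ((L.take a).contains (L.getD a "")) = true := by
        simp only [List.contains_iff_mem]
        rw [haD]
        have h := pv_getD_mem_take hba hbL
        rw [hbD] at h
        exact h
      exact absurd hp (by simpa using hmin a hai)
    · have hab : a < b := by omega
      have hp : ((L.take b).contains (L.getD b "")) = true := by
        simp only [List.contains_iff_mem]
        rw [hbD]
        have h := pv_getD_mem_take hab haL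
        rw [haD] at h
        exact h
      exact absurd hp (by simpa using hmin b hb)
  have hc1 : (pvOccN L d).countP (fun b => decide (b < i₀)) = 1 := by
    unfold pvOccN
    rw [List.countP_filter]
    apply pv_countP_range_one (a := a) haL
    · simp only [Bool.and_eq_true, decide_eq_true_eq, beq_iff_eq]
      exact ⟨hai, haD⟩
    · intro b hb hqb
      simp only [Bool.and_eq_true, decide_eq_true_eq, beq_iff_eq] at hqb
      exact huniq b hqb.1 hb hqb.2
  have hmem₀ : i₀ ∈ pvOccN L d := pv_mem_occN.mpr ⟨hin, rfl⟩
  have hm1 : (pvOccN L d)[1]? = some i₀ :=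
    pv_pairwise_getElem? (pv_occN_pairwise L d) hmem₀ hc1
  have hlen2 : 2 ≤ (pvOccN L d).length := by
    obtain ⟨h, _⟩ := List.getElem?_eq_some_iff.mp hm1
    omega
  -- second-occurrence key of any duplicated name
  have hkey : ∀ m : String, 2 ≤ (pvOccN L m).length →
      ∃ j : Nat, (pvOccN L m)[1]? = some j ∧
        PySem.List.pyGetD (pvOccI L m) 1 0 = (j : Int) ∧
        j < L.length ∧ L.getD j "" = m ∧ i₀ ≤ j := by
    intro m h2
    have h1lt : 1 < (pvOccN L m).length := h2
    have h0lt : 0 < (pvOccN L m).length := by omega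
    obtain ⟨hjL, hjD⟩ := pv_mem_occN.mp (List.getElem_mem h1lt)
    obtain ⟨h0L, h0D⟩ := pv_mem_occN.mp (List.getElem_mem h0lt)
    have h01 : (pvOccN L m)[0] < (pvOccN L m)[1] :=
      (List.pairwise_iff_getElem.mp (pv_occN_pairwise L m)) 0 1 h0lt h1lt (by omega)
    refine ⟨(pvOccN L m)[1], List.getElem?_eq_some_iff.mpr ⟨h1lt, rfl⟩, ?_, hjL, hjD, ?_⟩
    · rw [pv_occI_eq]
      have h1int : (1 : Int) = ((1 : Nat) : Int) := rfl
      rw [h1int, PySem.List.pyGetD_natCast]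
      rw [List.getD_eq_getElem?_getD, List.getElem?_map,
        List.getElem?_eq_getElem h1lt]
      simp
    · have hpredj : ((L.take (pvOccN L m)[1]).contains (L.getD (pvOccN L m)[1] "")) = true := by
        simp only [List.contains_iff_mem]
        rw [hjD]
        have h := pv_getD_mem_take h01 h0L
        rw [h0D] at h
        exact h
      by_contra h
      exact absurd hpredj (by simpa using hmin (pvOccN L m)[1] (by omega))
  -- assemble
  rw [pv_positions_values, List.filter_map]
  have hlenII : ∀ m : String, (pvOccI L m).length = (pvOccN L m).length := by
    intro m; rw [pv_occI_eq]; simp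
  have hdL : d ∈ L := by
    rw [hd, pv_getD_eq_getElem L hin]
    exact List.getElem_mem _
  have hdmem : pvOccI L d ∈ ((PySem.Set.ofList L).filter
      ((fun ps => decide (2 ≤ ps.length)) ∘ fun nm => pvOccI L nm)).map (fun nm => pvOccI L nm) := by
    apply List.mem_map.mpr
    refine ⟨d, List.mem_filter.mpr ⟨(PySem.Set.mem_ofList L d).mpr hdL, ?_⟩, rfl⟩
    simp [Function.comp, hlenII, hlen2]
  cases hmv : PySem.List.min? (((PySem.Set.ofList L).filter
      ((fun ps => decide (2 ≤ ps.length)) ∘ fun nm => pvOccI L nm)).map (fun nm => pvOccI L nm))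
      (fun ps => PySem.List.pyGetD ps 1 0) with
  | none =>
    rw [PySem.List.min?_eq_none_iff] at hmv
    rw [hmv] at hdmem
    simp at hdmem
  | some mv =>
    have hmvmem := PySem.List.min?_mem hmv
    obtain ⟨m, hmfil, hmeq⟩ := List.mem_map.mp hmvmem
    subst hmeq
    have hm2 : 2 ≤ (pvOccN L m).length := by
      have h := (List.mem_filter.mp hmfil).2
      simp only [Function.comp] at h
      rw [← hlenII m]
      simpa using h
    obtain ⟨jm, hjm?, hkeym, hjmL, hjmD, hijm⟩ := hkey m hm2
    obtain ⟨jd, hjd?, hkeyd, _, hjdD, _⟩ := hkey d hlen2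
    have hjd2 : jd = i₀ := Option.some.inj (hjd?.symm.trans hm1)
    have hle := PySem.List.min?_isMin hmv _ hdmem
    have hle2 : (jm : Int) ≤ (jd : Int) := by
      rw [← hkeym, ← hkeyd]
      exact hle
    have hji : jm = i₀ := by
      rw [hjd2] at hle2
      omega
    have hmd : m = d := by
      rw [← hjmD, hji]
    rw [hmd]

-- setting all indices of the duplicate, as a pointwise map
theorem pv_map_getD_range (ln : List String) (n : Nat) (h : ln.length = n) :
    (List.range n).map (fun j => ln.getD j "") = ln := by
  subst h
  apply List.ext_getElem (by simp)
  intro i h1 h2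
  simp [List.getD_eq_getElem?_getD, List.getElem?_eq_getElem h2]

theorem pv_foldl_set (F : List String) :
    ∀ (ks : List Nat) (L ln : List String), ks.Nodup → (∀ k ∈ ks, k < L.length) →
      ln.length = L.length → (∀ k ∈ ks, ln.getD k "" = L.getD k "") →
      ks.foldl (fun l k => l.set k (l.getD k "" ++ " (" ++ F.getD k "" ++ ")")) ln
        = (List.range L.length).map
            (fun j => if j ∈ ks then L.getD j "" ++ " (" ++ F.getD j "" ++ ")" else ln.getD j "") := by
  intro ks
  induction ks with
  | nil =>
    intro L ln _ _ hlen _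
    simp only [List.foldl_nil, List.not_mem_nil, if_false]
    exact (pv_map_getD_range ln L.length hlen).symm
  | cons k t ih =>
    intro L ln hnd hks hlen hag
    have hkt : k ∉ t := (List.nodup_cons.mp hnd).1
    have hndt : t.Nodup := (List.nodup_cons.mp hnd).2
    have hkL : k < L.length := hks k List.mem_cons_self
    rw [List.foldl_cons, hag k List.mem_cons_self]
    have hagree : ∀ k' ∈ t,
        (ln.set k (L.getD k "" ++ " (" ++ F.getD k "" ++ ")")).getD k' "" = L.getD k' "" := by
      intro k' hk'
      have hne : k ≠ k' := fun h => hkt (h ▸ hk')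
      rw [List.getD_eq_getElem?_getD, List.getElem?_set_ne hne, ← List.getD_eq_getElem?_getD]
      exact hag k' (List.mem_cons_of_mem _ hk')
    rw [ih L (ln.set k (L.getD k "" ++ " (" ++ F.getD k "" ++ ")")) hndt
      (fun k' hk' => hks k' (List.mem_cons_of_mem _ hk')) (by simp [hlen]) hagree]
    apply List.map_congr_left
    intro j hj
    have hjn : j < L.length := List.mem_range.mp hj
    by_cases hjt : j ∈ t
    · simp [hjt, List.mem_cons]
    · by_cases hjk : j = k
      · subst hjk
        have hmem : j ∈ j :: t := List.mem_cons_self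
        simp only [hjt, if_false, hmem, if_true]
        rw [List.getD_eq_getElem?_getD, List.getElem?_set_self (by omega)]
        rfl
      · have hnotin : j ∉ (k :: t) := by
          intro h; rcases List.mem_cons.mp h with h' | h' <;> [exact hjk h'; exact hjt h']
        simp only [hjt, if_false, hnotin, if_false]
        rw [List.getD_eq_getElem?_getD, List.getElem?_set_ne (fun h => hjk h.symm),
          ← List.getD_eq_getElem?_getD]

theorem pv_map_enum {β : Type} (L : List String) (g : Int × String → β) :
    (PySem.List.enumerate L 0).map g
      = (List.range L.length).map (fun (k : Nat) => g ((k : Int), L.getD k "")) := by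
  apply List.ext_getElem?
  intro k
  by_cases hk : k < L.length
  · rw [List.getElem?_map, List.getElem?_map, PySem.List.getElem?_enumerate,
      List.getElem?_range hk, List.getElem?_eq_getElem hk]
    simp only [Option.map_some, zero_add, pv_getD_eq_getElem L hk]
  · rw [List.getElem?_map, List.getElem?_map, PySem.List.getElem?_enumerate]
    rw [List.getElem?_eq_none (by simpa using hk), List.getElem?_eq_none (by simpa using hk)]
    rfl

-- the core: A's annotated list equals B's
theorem pv_core_list (L F : List String) (hstrip : ∀ x ∈ L, PySem.Str.strip x = x) :
    (pvFindElementIndex L (pvFindDuplicate L PySem.Set.empty)).foldl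
        (fun ln idx => PySem.List.pySetD ln idx
          (PySem.List.pyGetD ln idx "" ++ " (" ++ PySem.List.pyGetD F idx "" ++ ")")) L
      = (PySem.List.enumerate L 0).map (fun p =>
          match PySem.List.min?
              ((((PySem.List.enumerate L 0).foldl
                  (fun d p => PySem.Dict.modify d p.2 [] (fun l => l ++ [p.1])) PySem.Dict.empty).values).filter
                (fun ps => decide (2 ≤ ps.length)))
              (fun ps => PySem.List.pyGetD ps 1 0) with
          | some ps => if p.1 ∈ ps then p.2 ++ " (" ++ PySem.List.pyGetD F p.1 "" ++ ")" else p.2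
          | none => p.2) := by
  have hfd : pvFindDuplicate L PySem.Set.empty
      = ((List.range L.length).find? (fun i => (L.take i).contains (L.getD i ""))).map
          (fun i => PySem.Str.strip (L.getD i "")) := by
    have h := pv_fd_aux L []
    simpa using h
  cases hfind : (List.range L.length).find? (fun i => (L.take i).contains (L.getD i "")) with
  | none =>
    rw [hfind] at hfd
    simp only [Option.map_none] at hfd
    rw [hfd, pv_find_element_none, List.foldl_nil]
    have hcands : ((((PySem.List.enumerate L 0).foldl
        (fun d p => PySem.Dict.modify d p.2 [] (fun l => l ++ [p.1])) PySem.Dict.empty).values).filter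
          (fun ps => decide (2 ≤ ps.length))) = [] := by
      rw [pv_positions_values, List.filter_map, List.filter_eq_nil_iff.mpr, List.map_nil]
      intro nm _
      simp only [Function.comp]
      intro hcon
      simp at hcon
      have h2 : 2 ≤ (pvOccN L nm).length := by
        rw [pv_occI_eq] at hcon
        simpa using hcon
      exact pv_no_two L hfind nm h2
    rw [hcands]
    have : PySem.List.min? ([] : List (List Int)) (fun ps => PySem.List.pyGetD ps 1 0) = none :=
      (PySem.List.min?_eq_none_iff _ _).mpr rfl
    rw [this]
    have := PySem.List.map_snd_enumerate L 0
    exact this.symm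
  | some i₀ =>
    obtain ⟨hin, _, _⟩ := pv_find?_range_some hfind
    rw [hfind] at hfd
    simp only [Option.map_some] at hfd
    have hdL : L.getD i₀ "" ∈ L := by
      rw [pv_getD_eq_getElem L hin]
      exact List.getElem_mem _
    rw [hstrip _ hdL] at hfd
    rw [hfd, pv_find_element_some, pv_occI_eq]
    -- A side
    rw [List.foldl_map]
    simp only [PySem.List.pySetD_natCast, PySem.List.pyGetD_natCast]
    rw [pv_foldl_set F (pvOccN L (L.getD i₀ "")) L L
      ((pv_occN_pairwise L _).imp Nat.ne_of_lt)
      (fun k hk => (pv_mem_occN.mp hk).1) rfl (fun _ _ => rfl)]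
    -- B side
    rw [pv_best L hfind]
    rw [pv_map_enum L]
    apply List.map_congr_left
    intro j hj
    have hjn : j < L.length := List.mem_range.mp hj
    simp only []
    rw [pv_occI_eq]
    simp [PySem.List.pyGetD_natCast]

-- get_first_names as a map
theorem pv_first_names (c : String) :
    pvGetFirstNames c = ((PySem.Str.split? c ",").getD []).map
      (fun p => PySem.Str.strip (PySem.List.pyGetD
        ((PySem.Str.split? (PySem.Str.replace (PySem.Str.strip p) "and " "") " ").getD []) 0 "")) := by
  unfold pvGetFirstNames
  rw [PySem.List.foldl_append_singleton_eq_map]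
  simp

theorem pv_main (client_names mr_mrs_client_last_name : String) :
    add_names_to_duplicate_lastnames client_names mr_mrs_client_last_name
      = add_names_to_duplicate_lastnames_alt client_names mr_mrs_client_last_name := by
  simp only [add_names_to_duplicate_lastnames, add_names_to_duplicate_lastnames_alt]
  rw [pv_first_names]
  rw [pv_core_list
    (((PySem.Str.split? (PySem.Str.replace mr_mrs_client_last_name ", and " ",") ",").getD []).map PySem.Str.strip)
    (((PySem.Str.split? client_names ",").getD []).map
      (fun p => PySem.Str.strip (PySem.List.pyGetD
        ((PySem.Str.split? (PySem.Str.replace (PySem.Str.strip p) "and " "") " ").getD []) 0 "")))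
    (by
      intro x hx
      obtain ⟨y, _, rfl⟩ := List.mem_map.mp hx
      exact pv_strip_idem y)]

-- ===== VERDICT (by name: the statement is the Claim_ definition above) =====
theorem add_names_to_duplicate_lastnames_spec : Claim_equal_add_names_to_duplicate_lastnames := by
  intro c m _ _
  exact pv_main c m
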